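-- pv_equiv track=rewrite | github.com/provide-io/wrknv | mutants/src/wrknv/wenv/operations/verify.py | x_parse_terraform_version__mutmut_orig
-- ===== SOURCE A (Python) =====
-- def x_parse_terraform_version__mutmut_orig(output: str) -> dict[str, str]:
--     """Parse Terraform version output."""
--
--     # Example: "Terraform v1.5.0"
--     lines = output.split("\n")
--
--     info = {"tool": "terraform"}
--
--     for line in lines:
--         line = line.strip()
--         if line.startswith("Terraform v"):
--             version = line.replace("Terraform v", "")
--             info["version"] = version
--         elif line.startswith("on "):
--             # Extract platform from "on linux_amd64" format
--             info["platform"] = line.replace("on ", "").strip()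
--
--     return info
-- ===== SOURCE B (Python) =====
-- def x_parse_terraform_version__mutmut_orig(output: str) -> dict[str, str]:
--     """Parse Terraform version output."""
--     lines = [line.strip() for line in output.split("\n")]
--     versions = [l.replace("Terraform v", "") for l in lines if l.startswith("Terraform v")]
--     platforms = [l.replace("on ", "").strip() for l in lines if l.startswith("on ")]
--     info = {"tool": "terraform"}
--     if versions:
--         info["version"] = versions[-1]
--     if platforms:
--         info["platform"] = platforms[-1]
--     return info
-- ===== Notes on version B (the rewrite author's own statement) =====
-- stated objective: idiomatic
-- what changed: Replaces the stateful dict-overwriting loop by two per-key comprehensions over the stripped lines, taking the last match of each; Pre_ excludes outputs where a platform ('on ') line precedes every version line while a version line exists, where A's dict key order (platform before version) is an accident of insertion order.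
import Mathlib
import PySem

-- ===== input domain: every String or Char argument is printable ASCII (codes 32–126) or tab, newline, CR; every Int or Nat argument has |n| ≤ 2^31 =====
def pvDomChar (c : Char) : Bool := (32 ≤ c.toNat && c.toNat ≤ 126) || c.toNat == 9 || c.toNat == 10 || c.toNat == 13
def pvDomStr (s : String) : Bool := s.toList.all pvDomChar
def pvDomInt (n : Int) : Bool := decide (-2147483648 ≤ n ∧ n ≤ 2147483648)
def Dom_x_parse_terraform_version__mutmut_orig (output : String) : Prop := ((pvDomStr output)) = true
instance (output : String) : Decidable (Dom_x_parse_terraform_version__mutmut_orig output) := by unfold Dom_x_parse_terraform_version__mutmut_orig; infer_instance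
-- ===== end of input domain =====

-- B replaces A's stateful dict-overwriting loop by two per-key comprehensions over the stripped
-- lines, taking the last match of each (objective: idiomatic; same value on Pre_).

-- ===== PORT A =====
def pvStepA (info : PySem.Dict String String) (line : String) : PySem.Dict String String :=
  let s := PySem.Str.strip line
  if PySem.Str.startswith s "Terraform v" then
    info.insert "version" (PySem.Str.replace s "Terraform v" "")
  else if PySem.Str.startswith s "on " then
    info.insert "platform" (PySem.Str.strip (PySem.Str.replace s "on " ""))
  else info

def x_parse_terraform_version__mutmut_orig (output : String) : List (String × String) :=
  let lines := (PySem.Str.split? output "\n").getD []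
  let info := PySem.Dict.ofList [("tool", "terraform")]
  (lines.foldl pvStepA info).items

-- ===== PORT B =====
def x_parse_terraform_version__mutmut_orig_alt (output : String) : List (String × String) :=
  let lines := ((PySem.Str.split? output "\n").getD []).map PySem.Str.strip
  let versions := (lines.filter (fun l => PySem.Str.startswith l "Terraform v")).map
      (fun l => PySem.Str.replace l "Terraform v" "")
  let platforms := (lines.filter (fun l => PySem.Str.startswith l "on ")).map
      (fun l => PySem.Str.strip (PySem.Str.replace l "on " ""))
  let info := PySem.Dict.ofList [("tool", "terraform")]
  let info := if versions ≠ [] then info.insert "version" versions.getLast! else info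
  let info := if platforms ≠ [] then info.insert "platform" platforms.getLast! else info
  info.items

-- ===== PRECONDITION & SPEC =====
-- Pre_ excludes outputs where a (stripped) "on " line precedes every "Terraform v" line while a
-- "Terraform v" line exists: there A's dict happens to list 'platform' before 'version', an
-- accident of insertion order, and B's fixed version-then-platform order is equally defensible.
def pvPreLines (S : List String) : Prop :=
  ∀ i, i < S.length → PySem.Str.startswith S[i]! "on " = true →
    (∃ j, j < i ∧ PySem.Str.startswith S[j]! "Terraform v" = true) ∨
    (∀ j, j < S.length → PySem.Str.startswith S[j]! "Terraform v" = false)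

def Pre_x_parse_terraform_version__mutmut_orig (output : String) : Prop :=
  pvPreLines (((PySem.Str.split? output "\n").getD []).map PySem.Str.strip)

instance (output : String) : Decidable (Pre_x_parse_terraform_version__mutmut_orig output) := by
  unfold Pre_x_parse_terraform_version__mutmut_orig pvPreLines; infer_instance

def pvWitness_x_parse_terraform_version__mutmut_orig : String := "Terraform v1.5.0\non linux_amd64"

def Spec_x_parse_terraform_version__mutmut_orig (output : String) (out : List (String × String)) : Prop := out = x_parse_terraform_version__mutmut_orig_alt output
instance (output : String) (out : List (String × String)) : Decidable (Spec_x_parse_terraform_version__mutmut_orig output out) := by unfold Spec_x_parse_terraform_version__mutmut_orig; infer_instance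

-- ===== CLAIM (what is proved, stated in full; the proofs are below) =====
def Claim_equal_x_parse_terraform_version__mutmut_orig : Prop := ∀ (output : String), Dom_x_parse_terraform_version__mutmut_orig output → Pre_x_parse_terraform_version__mutmut_orig output → Spec_x_parse_terraform_version__mutmut_orig output (x_parse_terraform_version__mutmut_orig output)

-- ===== LEMMAS AND PROOFS =====

-- A's loop body on an ALREADY-stripped line (pvStepA d l is definitionally pvStep' d (strip l))
def pvStep' (info : PySem.Dict String String) (s : String) : PySem.Dict String String :=
  if PySem.Str.startswith s "Terraform v" then
    info.insert "version" (PySem.Str.replace s "Terraform v" "")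
  else if PySem.Str.startswith s "on " then
    info.insert "platform" (PySem.Str.strip (PySem.Str.replace s "on " ""))
  else info

def pvInit : PySem.Dict String String := PySem.Dict.ofList [("tool", "terraform")]

-- indexed variants of B's comprehensions, used only by the proof's loop invariant
def pvVs (S : List String) : List (Int × String) :=
  ((PySem.List.enumerate S).filter (fun p => PySem.Str.startswith p.2 "Terraform v")).map
    (fun p => (p.1, PySem.Str.replace p.2 "Terraform v" ""))

def pvPs (S : List String) : List (Int × String) :=
  ((PySem.List.enumerate S).filter (fun p => PySem.Str.startswith p.2 "on ")).map
    (fun p => (p.1, PySem.Str.strip (PySem.Str.replace p.2 "on " "")))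

-- what A's loop computes, as a function of the two indexed comprehension results
def pvAssemble (vs ps : List (Int × String)) : PySem.Dict String String :=
  if vs ≠ [] ∧ ps ≠ [] ∧ ps.head!.1 < vs.head!.1 then
    (pvInit.insert "platform" ps.getLast!.2).insert "version" vs.getLast!.2
  else
    let info1 := if vs ≠ [] then pvInit.insert "version" vs.getLast!.2 else pvInit
    if ps ≠ [] then info1.insert "platform" ps.getLast!.2 else info1

lemma pvEnumerate_append (S : List String) (x : String) (s : Int) :
    PySem.List.enumerate (S ++ [x]) s = PySem.List.enumerate S s ++ [(s + S.length, x)] := by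
  induction S generalizing s with
  | nil => simp [PySem.List.enumerate_nil, PySem.List.enumerate_cons]
  | cons a tl ih => simp [PySem.List.enumerate_cons, ih]; ring

-- no line starts with both "Terraform v" and "on "
lemma pvNotBoth {s : String} (h : PySem.Str.startswith s "Terraform v" = true) :
    PySem.Str.startswith s "on " = false := by
  rw [← Bool.not_eq_true]
  intro hc
  rw [PySem.Str.startswith_eq, PySem.Chars.startswith_iff] at h hc
  rcases List.prefix_or_prefix_of_prefix hc h with h1 | h1 <;> exact absurd h1 (by decide)

lemma pvEnumIdxLt {p : Int × String} {S : List String} (h : p ∈ PySem.List.enumerate S 0) :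
    p.1 < S.length := by
  have h1 := List.mem_map_of_mem (f := Prod.fst) h
  rw [PySem.List.map_fst_enumerate] at h1
  have := (PySem.List.mem_pyRange_one.mp h1).2
  omega

lemma pvVsIdxLt {p : Int × String} {S : List String} (h : p ∈ pvVs S) : p.1 < S.length := by
  unfold pvVs at h
  obtain ⟨q, hq, hpq⟩ := List.mem_map.mp h
  have h2 := pvEnumIdxLt (List.mem_of_mem_filter hq)
  rw [← hpq]
  exact h2

lemma pvPsIdxLt {p : Int × String} {S : List String} (h : p ∈ pvPs S) : p.1 < S.length := by
  unfold pvPs at h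
  obtain ⟨q, hq, hpq⟩ := List.mem_map.mp h
  have h2 := pvEnumIdxLt (List.mem_of_mem_filter hq)
  rw [← hpq]
  exact h2

lemma pvVs_append (S : List String) (x : String) :
    pvVs (S ++ [x]) = pvVs S ++
      (if PySem.Str.startswith x "Terraform v" then
        [((S.length : Int), PySem.Str.replace x "Terraform v" "")] else []) := by
  unfold pvVs
  rw [pvEnumerate_append, List.filter_append, List.map_append]
  congr 1
  by_cases h : PySem.Str.startswith x "Terraform v"
  · have h' : PySem.Chars.startswith x.toList ['T','e','r','r','a','f','o','r','m',' ','v'] = true := h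
    simp [h']
  · have h' : PySem.Chars.startswith x.toList ['T','e','r','r','a','f','o','r','m',' ','v'] = false := by
      simpa using h
    simp [h']

lemma pvPs_append (S : List String) (x : String) :
    pvPs (S ++ [x]) = pvPs S ++
      (if PySem.Str.startswith x "on " then
        [((S.length : Int), PySem.Str.strip (PySem.Str.replace x "on " ""))] else []) := by
  unfold pvPs
  rw [pvEnumerate_append, List.filter_append, List.map_append]
  congr 1
  by_cases h : PySem.Str.startswith x "on "
  · have h' : PySem.Chars.startswith x.toList ['o','n',' '] = true := h
    simp [h']
  · have h' : PySem.Chars.startswith x.toList ['o','n',' '] = false := by simpa using h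
    simp [h']

-- dict-insert identities on the three keys (values abstract; each is definitional)
lemma pvIns_vv (a b : String) :
    (pvInit.insert "version" a).insert "version" b = pvInit.insert "version" b := rfl
lemma pvIns_pp (a b : String) :
    (pvInit.insert "platform" a).insert "platform" b = pvInit.insert "platform" b := rfl
lemma pvIns_pvv (p a b : String) :
    ((pvInit.insert "platform" p).insert "version" a).insert "version" b =
      (pvInit.insert "platform" p).insert "version" b := rfl
lemma pvIns_vpv (a p b : String) :
    ((pvInit.insert "version" a).insert "platform" p).insert "version" b =
      (pvInit.insert "version" b).insert "platform" p := rfl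
lemma pvIns_pvp (p v c : String) :
    ((pvInit.insert "platform" p).insert "version" v).insert "platform" c =
      (pvInit.insert "platform" c).insert "version" v := rfl
lemma pvIns_vpp (v p c : String) :
    ((pvInit.insert "version" v).insert "platform" p).insert "platform" c =
      (pvInit.insert "version" v).insert "platform" c := rfl

lemma pvGetLastD_cons_append {α : Type} [Inhabited α] (a : α) (tl : List α) (y : α) :
    ((a :: (tl ++ [y])).getLast?.getD default) = y := by
  rw [← List.cons_append, List.getLast?_concat]; rfl

-- one snoc step: applying A's loop body commutes with the assembly of the indexed comprehensions
lemma pvStep_assemble (vs ps : List (Int × String)) (n : Int) (x : String)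
    (hvs : ∀ p ∈ vs, p.1 < n) (hps : ∀ p ∈ ps, p.1 < n) :
    pvStep' (pvAssemble vs ps) x =
      pvAssemble
        (vs ++ (if PySem.Str.startswith x "Terraform v" then
          [(n, PySem.Str.replace x "Terraform v" "")] else []))
        (ps ++ (if PySem.Str.startswith x "on " then
          [(n, PySem.Str.strip (PySem.Str.replace x "on " ""))] else [])) := by
  by_cases hv : PySem.Str.startswith x "Terraform v"
  · have hv' : PySem.Chars.startswith x.toList ['T','e','r','r','a','f','o','r','m',' ','v'] = true := hv
    have hp' : PySem.Chars.startswith x.toList ['o','n',' '] = false := pvNotBoth hv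
    rw [if_pos hv, if_neg (by simp [hp'])]
    rcases vs with _ | ⟨v0, vtl⟩
    · rcases ps with _ | ⟨p0, ptl⟩
      · simp [pvAssemble, pvStep', hv', hp', pvIns_vv, pvIns_pp, pvIns_pvv, pvIns_vpv, pvIns_pvp, pvIns_vpp]
      · have hlt : p0.1 < n := hps p0 (List.mem_cons_self ..)
        simp [pvAssemble, pvStep', hv', hp', hlt, pvIns_vv, pvIns_pp, pvIns_pvv, pvIns_vpv, pvIns_pvp, pvIns_vpp]
    · rcases ps with _ | ⟨p0, ptl⟩
      · simp [pvAssemble, pvStep', hv', hp', pvGetLastD_cons_append, pvIns_vv, pvIns_pp, pvIns_pvv, pvIns_vpv, pvIns_pvp, pvIns_vpp]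
      · by_cases hord : p0.1 < v0.1 <;>
          simp [pvAssemble, pvStep', hv', hp', hord, pvGetLastD_cons_append, pvIns_vv, pvIns_pp, pvIns_pvv, pvIns_vpv, pvIns_pvp, pvIns_vpp]
  · by_cases hp : PySem.Str.startswith x "on "
    · have hv' : PySem.Chars.startswith x.toList ['T','e','r','r','a','f','o','r','m',' ','v'] = false := by
        simpa using hv
      have hp' : PySem.Chars.startswith x.toList ['o','n',' '] = true := hp
      rw [if_neg hv, if_pos hp]
      rcases ps with _ | ⟨p0, ptl⟩
      · rcases vs with _ | ⟨v0, vtl⟩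
        · simp [pvAssemble, pvStep', hv', hp', pvIns_vv, pvIns_pp, pvIns_pvv, pvIns_vpv, pvIns_pvp, pvIns_vpp]
        · have hlt : v0.1 < n := hvs v0 (List.mem_cons_self ..)
          simp [pvAssemble, pvStep', hv', hp', show ¬ (n < v0.1) by omega, pvIns_vv, pvIns_pp, pvIns_pvv, pvIns_vpv, pvIns_pvp, pvIns_vpp]
      · rcases vs with _ | ⟨v0, vtl⟩
        · simp [pvAssemble, pvStep', hv', hp', pvGetLastD_cons_append, pvIns_vv, pvIns_pp, pvIns_pvv, pvIns_vpv, pvIns_pvp, pvIns_vpp]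
        · by_cases hord : p0.1 < v0.1 <;>
            simp [pvAssemble, pvStep', hv', hp', hord, pvGetLastD_cons_append, pvIns_vv, pvIns_pp, pvIns_pvv, pvIns_vpv, pvIns_pvp, pvIns_vpp]
    · have hv' : PySem.Chars.startswith x.toList ['T','e','r','r','a','f','o','r','m',' ','v'] = false := by
        simpa using hv
      have hp' : PySem.Chars.startswith x.toList ['o','n',' '] = false := by simpa using hp
      rw [if_neg hv, if_neg hp]
      simp [pvAssemble, pvStep', hv', hp']

-- the loop invariant: A's fold over stripped lines equals the assembly of the indexed comprehensions
lemma pvMain (S : List String) :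
    S.foldl pvStep' pvInit = pvAssemble (pvVs S) (pvPs S) := by
  induction S using List.reverseRecOn with
  | nil => rfl
  | append_singleton S x ih =>
    rw [List.foldl_append, List.foldl_cons, List.foldl_nil, ih, pvVs_append, pvPs_append]
    exact pvStep_assemble _ _ _ x (fun p hp => pvVsIdxLt hp) (fun p hp => pvPsIdxLt hp)


lemma pvProj (f : String → Bool) (g : String → String) (S : List String) (s : Int) :
    (((PySem.List.enumerate S s).filter (fun p => f p.2)).map (fun p => (p.1, g p.2))).map Prod.snd
      = (S.filter f).map g := by
  induction S generalizing s with
  | nil => simp [PySem.List.enumerate_nil]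
  | cons a tl ih =>
    by_cases h : f a <;> simp [PySem.List.enumerate_cons, List.filter_cons, h, ih]

-- the head of a filtered enumeration carries the FIRST matching index
lemma pvFirst (f : String → Bool) (g : String → String) (S : List String) (s : Int)
    (h : (((PySem.List.enumerate S s).filter (fun p => f p.2)).map (fun p => (p.1, g p.2))) ≠ []) :
    ∃ k : Nat, k < S.length ∧ f (S[k]!) = true ∧ (∀ j, j < k → f (S[j]!) = false) ∧
      (((PySem.List.enumerate S s).filter (fun p => f p.2)).map (fun p => (p.1, g p.2))).head!.1 = s + k := by
  induction S generalizing s with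
  | nil => simp [PySem.List.enumerate_nil] at h
  | cons a tl ih =>
    by_cases ha : f a
    · refine ⟨0, by simp, by simpa using ha, fun j hj => absurd hj (by omega), ?_⟩
      simp [PySem.List.enumerate_cons, List.filter_cons, ha]
    · rw [PySem.List.enumerate_cons, List.filter_cons_of_neg (by simpa using ha)] at h ⊢
      obtain ⟨k, hk, hfk, hmin, hhead⟩ := ih (s+1) h
      refine ⟨k+1, by simpa using hk, by simpa using hfk, ?_, ?_⟩
      · intro j hj
        cases j with
        | zero => simpa using ha
        | succ j' => rw [List.getElem!_cons_succ]; exact hmin j' (by omega)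
      · rw [hhead]; push_cast; ring

lemma pvGetLastMap {α β : Type} [Inhabited α] [Inhabited β] (F : α → β) (l : List α) (h : l ≠ []) :
    (l.map F).getLast! = F l.getLast! := by
  induction l using List.reverseRecOn with
  | nil => exact absurd rfl h
  | append_singleton tl x _ => simp

-- under the precondition, A's assembly collapses to B's fixed version-then-platform chain
lemma pvSndGetLast (l : List (Int × String)) :
    ((Option.map Prod.snd l.getLast?).getD "") = (l.getLast?.getD default).2 := by
  cases l.getLast? <;> rfl

lemma pvAssembleEq (S : List String) (hpre : pvPreLines S) :
    pvAssemble (pvVs S) (pvPs S) =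
      (let versions := (S.filter (fun l => PySem.Str.startswith l "Terraform v")).map
          (fun l => PySem.Str.replace l "Terraform v" "");
       let platforms := (S.filter (fun l => PySem.Str.startswith l "on ")).map
          (fun l => PySem.Str.strip (PySem.Str.replace l "on " ""));
       let info := if versions ≠ [] then pvInit.insert "version" versions.getLast! else pvInit;
       if platforms ≠ [] then info.insert "platform" platforms.getLast! else info) := by
  have hVproj : (pvVs S).map Prod.snd
      = (S.filter (fun l => PySem.Str.startswith l "Terraform v")).map
          (fun l => PySem.Str.replace l "Terraform v" "") :=
    pvProj (fun l => PySem.Str.startswith l "Terraform v")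
      (fun l => PySem.Str.replace l "Terraform v" "") S 0
  have hPproj : (pvPs S).map Prod.snd
      = (S.filter (fun l => PySem.Str.startswith l "on ")).map
          (fun l => PySem.Str.strip (PySem.Str.replace l "on " "")) :=
    pvProj (fun l => PySem.Str.startswith l "on ")
      (fun l => PySem.Str.strip (PySem.Str.replace l "on " "")) S 0
  simp only [← hVproj, ← hPproj]
  by_cases hv : pvVs S = []
  · by_cases hp : pvPs S = []
    · simp [pvAssemble, hv, hp]
    · simp [pvAssemble, hv, hp, pvSndGetLast]
  · have hVlast := pvGetLastMap Prod.snd (pvVs S) hv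
    by_cases hp : pvPs S = []
    · simp [pvAssemble, hv, hp, pvSndGetLast]
    · have hPlast := pvGetLastMap Prod.snd (pvPs S) hp
      have hv' : (((PySem.List.enumerate S 0).filter
            (fun p => PySem.Str.startswith p.2 "Terraform v")).map
            (fun p => (p.1, PySem.Str.replace p.2 "Terraform v" ""))) ≠ [] := hv
      have hp' : (((PySem.List.enumerate S 0).filter
            (fun p => PySem.Str.startswith p.2 "on ")).map
            (fun p => (p.1, PySem.Str.strip (PySem.Str.replace p.2 "on " "")))) ≠ [] := hp
      obtain ⟨k, hk, hfk, hmink, hheadV⟩ := pvFirst (fun l => PySem.Str.startswith l "Terraform v") (fun l => PySem.Str.replace l "Terraform v" "") S 0 hv'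
      obtain ⟨i, hi, hfi, _, hheadP⟩ := pvFirst (fun l => PySem.Str.startswith l "on ") (fun l => PySem.Str.strip (PySem.Str.replace l "on " "")) S 0 hp'
      have hheadV' : (pvVs S).head!.1 = 0 + (k:Int) := hheadV
      have hheadP' : (pvPs S).head!.1 = 0 + (i:Int) := hheadP
      have hnot : ¬ (pvPs S).head!.1 < (pvVs S).head!.1 := by
        rcases hpre i hi hfi with ⟨j, hj, hfj⟩ | hnone
        · have hkj : k ≤ j := by
            by_contra hlt
            push_neg at hlt
            rw [hmink j hlt] at hfj
            exact absurd hfj (by simp)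
          rw [hheadV', hheadP']
          omega
        · have h3 := hnone k hk
          simp at h3 hfk
          simp [h3] at hfk
      simp [pvAssemble, hv, hp, hnot, pvSndGetLast]

-- ===== VERDICT (by name: the statement is the Claim_ definition above) =====
theorem x_parse_terraform_version__mutmut_orig_spec : Claim_equal_x_parse_terraform_version__mutmut_orig := by
  intro output _ hpre
  have hpre' : pvPreLines (((PySem.Str.split? output "\n").getD []).map PySem.Str.strip) := hpre
  show _ = _
  have hfold : ((PySem.Str.split? output "\n").getD []).foldl pvStepA pvInit
      = (((PySem.Str.split? output "\n").getD []).map PySem.Str.strip).foldl pvStep' pvInit := by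
    rw [List.foldl_map]
    rfl
  show (((PySem.Str.split? output "\n").getD []).foldl pvStepA pvInit).items = _
  rw [hfold, pvMain, pvAssembleEq _ hpre']
  rfl
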